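-- pv_equiv track=rewrite | github.com/HolczliAndrei/Laborator_Sem2 | Lab_2.py | masini_2
-- ===== SOURCE A (Python) =====
-- def masini_2(timp_lucru, timp_masini):
--     timp_masini.sort()
--     lista_masini_reparate = []
--     i = 0
--     while i < len(timp_masini) and timp_masini[i] <= timp_lucru:
--         lista_masini_reparate.append(timp_masini[i])
--         timp_lucru -= timp_masini[i]
--         i += 1
--     return lista_masini_reparate
-- ===== SOURCE B (Python) =====
-- def masini_2(timp_lucru, timp_masini):
--     # Selection-based: repeatedly extract the minimum from a working copy
--     # while it fits the remaining budget. No sort; does not mutate the argument.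
--     rest = list(timp_masini)
--     reparate = []
--     while rest:
--         m = min(rest)
--         if m > timp_lucru:
--             break
--         rest.remove(m)
--         reparate.append(m)
--         timp_lucru -= m
--     return reparate
-- ===== Notes on version B (the rewrite author's own statement) =====
-- stated objective: alternative
-- what changed: Replaces sort-then-scan-a-prefix with selection: repeatedly extract the minimum of a working copy (min + remove) while it fits the remaining budget, so no sorting happens at all; B does not mutate the argument (A sorts it in place), the equivalence is about the return value.
import Mathlib
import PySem

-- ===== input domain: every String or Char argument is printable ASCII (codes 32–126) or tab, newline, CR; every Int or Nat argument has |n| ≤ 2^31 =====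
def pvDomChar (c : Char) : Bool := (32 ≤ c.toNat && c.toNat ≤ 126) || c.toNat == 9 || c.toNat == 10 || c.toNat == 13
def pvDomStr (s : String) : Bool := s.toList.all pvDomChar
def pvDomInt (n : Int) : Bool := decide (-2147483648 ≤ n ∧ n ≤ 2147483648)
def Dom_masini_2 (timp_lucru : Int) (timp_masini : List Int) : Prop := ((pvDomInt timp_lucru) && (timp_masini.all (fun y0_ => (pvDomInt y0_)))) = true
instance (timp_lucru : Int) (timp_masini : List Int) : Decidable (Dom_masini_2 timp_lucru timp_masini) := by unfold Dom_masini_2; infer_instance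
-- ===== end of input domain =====

-- B replaces sort-then-scan with repeated min-extraction (selection, no sort); equivalence is about the RETURN value only — A sorts its argument in place, B leaves it untouched.
-- ===== PORT A =====
-- while i < len and l[i] <= budget: append l[i]; budget -= l[i]  — scan over the sorted list with the remaining budget
def masini_2_loop (budget : Int) : List Int → List Int
  | [] => []
  | x :: xs => if x ≤ budget then x :: masini_2_loop (budget - x) xs else []

def masini_2 (timp_lucru : Int) (timp_masini : List Int) : List Int :=
  masini_2_loop timp_lucru (PySem.List.sorted timp_masini (fun x => x))

-- ===== PORT B =====
-- while rest: m = min(rest); if m > budget: break; rest.remove(m); append m; budget -= m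
def masini_2_sel (budget : Int) (rest : List Int) : List Int :=
  match hm : PySem.List.min? rest (fun x => x) with
  | none => []
  | some m =>
    if m > budget then []
    else
      match hr : PySem.List.remove? rest m with
      | none => []   -- unreachable: min(rest) ∈ rest
      | some rest' => m :: masini_2_sel (budget - m) rest'
termination_by rest.length
decreasing_by
  have hmem : m ∈ rest := PySem.List.min?_mem hm
  have := PySem.List.remove?_eq_some_erase rest m hmem
  rw [this] at hr
  cases hr
  rw [List.length_erase_of_mem hmem]
  exact Nat.pred_lt (by simpa using (List.length_pos_of_mem hmem).ne')

def masini_2_alt (timp_lucru : Int) (timp_masini : List Int) : List Int :=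
  masini_2_sel timp_lucru timp_masini

-- ===== PRECONDITION & SPEC =====
def Spec_masini_2 (timp_lucru : Int) (timp_masini : List Int) (out : List Int) : Prop := out = masini_2_alt timp_lucru timp_masini
instance (timp_lucru : Int) (timp_masini : List Int) (out : List Int) : Decidable (Spec_masini_2 timp_lucru timp_masini out) := by unfold Spec_masini_2; infer_instance

-- ===== CLAIM (what is proved, stated in full; the proofs are below) =====
def Claim_equal_masini_2 : Prop := ∀ (timp_lucru : Int) (timp_masini : List Int), Dom_masini_2 timp_lucru timp_masini → Spec_masini_2 timp_lucru timp_masini (masini_2 timp_lucru timp_masini)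

-- ===== LEMMAS AND PROOFS =====
-- sorted l = min(l) :: sorted (l minus that one minimum): the head of the sorted list is the minimum
theorem sorted_eq_min_cons (l : List Int) (m : Int)
    (hm : PySem.List.min? l (fun x => x) = some m) :
    PySem.List.sorted l (fun x => x) = m :: PySem.List.sorted (l.erase m) (fun x => x) := by
  have hmem : m ∈ l := PySem.List.min?_mem hm
  have hmin : ∀ y ∈ l, m ≤ y := by
    intro y hy; simpa using PySem.List.min?_isMin hm y hy
  apply PySem.List.sorted_id_eq_of_perm_of_pairwise
  · exact ((PySem.List.sorted_perm (l.erase m) (fun x => x) false).cons m).trans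
      (List.perm_cons_erase hmem).symm
  · refine List.pairwise_cons.2 ⟨?_, ?_⟩
    · intro y hy
      have : y ∈ l.erase m := (PySem.List.mem_sorted _ _ _ _).1 hy
      exact hmin y (List.mem_of_mem_erase this)
    · simpa using PySem.List.sorted_pairwise (l.erase m) (fun x => x)

theorem loop_eq_sel (n : Nat) : ∀ (l : List Int), l.length ≤ n → ∀ (t : Int),
    masini_2_loop t (PySem.List.sorted l (fun x => x)) = masini_2_sel t l := by
  induction n with
  | zero =>
    intro l hl t
    have : l = [] := List.length_eq_zero_iff.1 (Nat.le_zero.1 hl)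
    subst this
    rw [masini_2_sel.eq_def]
    simp [masini_2_loop, PySem.List.sorted, PySem.List.min?]
  | succ n ih =>
    intro l hl t
    cases hm : PySem.List.min? l (fun x => x) with
    | none =>
      have : l = [] := (PySem.List.min?_eq_none_iff _ _).1 hm
      subst this
      rw [masini_2_sel.eq_def]
      simp [masini_2_loop, PySem.List.sorted, PySem.List.min?]
    | some m =>
      have hmem : m ∈ l := PySem.List.min?_mem hm
      have hsort := sorted_eq_min_cons l m hm
      rw [masini_2_sel.eq_def]
      rw [hm]
      by_cases hb : m > t
      · simp only [hb, if_pos]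
        rw [hsort]
        simp [masini_2_loop, show ¬ m ≤ t by omega]
      · simp only [hb, if_neg, not_false_iff]
        rw [PySem.List.remove?_eq_some_erase l m hmem]
        rw [hsort]
        simp only [masini_2_loop, show m ≤ t by omega, if_pos]
        have hlen : (l.erase m).length ≤ n := by
          rw [List.length_erase_of_mem hmem]
          have := List.length_pos_of_mem hmem
          omega
        rw [ih (l.erase m) hlen (t - m)]

-- ===== VERDICT (by name: the statement is the Claim_ definition above) =====
theorem masini_2_spec : Claim_equal_masini_2 := by
  intro t l _
  unfold Spec_masini_2 masini_2 masini_2_alt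
  exact loop_eq_sel l.length l (le_refl _) t
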